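-- pv_equiv track=rewrite | github.com/digitalgoldfisj79/Voynich | VPCA-SM/vpca_sm2_role_classes.py | extract_morphemes
-- ===== SOURCE A (Python) =====
-- def extract_morphemes(token):
--     """
--     Basic morpheme extraction
--     Returns (prefix, core, suffix)
--     """
--     # Common prefixes
--     prefixes = ['qok', 'sh', 'ch', 'ck', 'kch', 'dch', 'ych', 'ol', 'd', 'k', 's', 'l', 'r', 'y', 't', 'p', 'f']
--
--     # Common suffixes (including OT family)
--     suffixes = [
--         'otchy', 'otchor', 'otol', 'oty', 'ot',  # OT family
--         'aiin', 'ain', 'iin', 'eey', 'ey', 'dy', 'edy', 'ody',  # -ain/-dy families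
--         'al', 'ol', 'ar', 'or', 'am',  # liquid finals
--         'che', 'he', 'ee', 'e',  # e-finals
--         'chy', 'hy', 'y',  # y-finals
--         'ch', 'h', 'k', 'd', 'l', 'm', 'n', 'r', 's', 't'  # single consonants
--     ]
--
--     # Sort by length (longest first for greedy matching)
--     prefixes.sort(key=len, reverse=True)
--     suffixes.sort(key=len, reverse=True)
--
--     token_lower = token.lower()
--     prefix = ""
--     suffix = ""
--     core = token_lower
--
--     # Extract prefix
--     for p in prefixes:
--         if token_lower.startswith(p) and len(token_lower) > len(p):
--             prefix = p
--             core = token_lower[len(p):]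
--             break
--
--     # Extract suffix
--     for s in suffixes:
--         if core.endswith(s) and len(core) > len(s):
--             suffix = s
--             core = core[:-len(s)]
--             break
--
--     return (prefix, core, suffix)
-- ===== SOURCE B (Python) =====
-- # Length-indexed set lookup: instead of scanning a sorted candidate list, try
-- # candidate lengths from longest to shortest and test slice membership in a set.
--
-- PREFIX_SET = {'qok', 'sh', 'ch', 'ck', 'kch', 'dch', 'ych', 'ol',
--               'd', 'k', 's', 'l', 'r', 'y', 't', 'p', 'f'}
--
-- SUFFIX_SET = {'otchy', 'otchor', 'otol', 'oty', 'ot',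
--               'aiin', 'ain', 'iin', 'eey', 'ey', 'dy', 'edy', 'ody',
--               'al', 'ol', 'ar', 'or', 'am',
--               'che', 'he', 'ee', 'e',
--               'chy', 'hy', 'y',
--               'ch', 'h', 'k', 'd', 'l', 'm', 'n', 'r', 's', 't'}
--
--
-- def extract_morphemes(token):
--     """
--     Basic morpheme extraction
--     Returns (prefix, core, suffix)
--     """
--     t = token.lower()
--     prefix = ""
--     core = t
--     for L in range(min(3, len(t) - 1), 0, -1):
--         if t[:L] in PREFIX_SET:
--             prefix, core = t[:L], t[L:]
--             break
--     suffix = ""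
--     for L in range(min(6, len(core) - 1), 0, -1):
--         if core[-L:] in SUFFIX_SET:
--             suffix, core = core[-L:], core[:-L]
--             break
--     return (prefix, core, suffix)
-- ===== Notes on version B (the rewrite author's own statement) =====
-- stated objective: idiomatic
-- what changed: Replaces the sort-then-scan over candidate lists with module-level sets and a candidate-length loop (longest slice first) testing set membership, so no per-token sorting or list scan remains.
import Mathlib
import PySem

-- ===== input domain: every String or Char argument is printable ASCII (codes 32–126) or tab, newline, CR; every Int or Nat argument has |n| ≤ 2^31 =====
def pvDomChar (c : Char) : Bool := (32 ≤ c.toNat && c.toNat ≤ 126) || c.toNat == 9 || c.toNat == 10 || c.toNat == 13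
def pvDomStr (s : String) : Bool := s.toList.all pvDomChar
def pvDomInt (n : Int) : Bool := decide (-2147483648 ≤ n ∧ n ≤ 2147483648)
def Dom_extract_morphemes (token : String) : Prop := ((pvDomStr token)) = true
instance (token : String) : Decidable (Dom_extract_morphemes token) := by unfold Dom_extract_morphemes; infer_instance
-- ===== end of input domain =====

-- B replaces A's per-call sort-and-scan over candidate lists by fixed sets and a
-- longest-first candidate-length loop with set membership tests (idiomatic; same result).

-- ===== PORT A =====
-- the 'for p in prefixes: if token_lower.startswith(p) and len(token_lower) > len(p): … break' loop
def aPref (tl : List Char) : List (List Char) → List Char × List Char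
  | [] => ([], tl)
  | p :: rest =>
    if PySem.Chars.startswith tl p = true ∧ p.length < tl.length then
      (p, PySem.List.slice tl (some (p.length : Int)) none)
    else aPref tl rest

-- the 'for s in suffixes: if core.endswith(s) and len(core) > len(s): … break' loop
def aSuf (c : List Char) : List (List Char) → List Char × List Char
  | [] => ([], c)
  | s :: rest =>
    if PySem.Chars.endswith c s = true ∧ s.length < c.length then
      (s, PySem.List.slice c none (some (-(s.length : Int))))
    else aSuf c rest

def extract_morphemes (token : String) : String × String × String :=
  let prefixes : List (List Char) :=
    ["qok".toList, "sh".toList, "ch".toList, "ck".toList, "kch".toList, "dch".toList,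
     "ych".toList, "ol".toList, "d".toList, "k".toList, "s".toList, "l".toList,
     "r".toList, "y".toList, "t".toList, "p".toList, "f".toList]
  let suffixes : List (List Char) :=
    ["otchy".toList, "otchor".toList, "otol".toList, "oty".toList, "ot".toList,
     "aiin".toList, "ain".toList, "iin".toList, "eey".toList, "ey".toList, "dy".toList,
     "edy".toList, "ody".toList,
     "al".toList, "ol".toList, "ar".toList, "or".toList, "am".toList,
     "che".toList, "he".toList, "ee".toList, "e".toList,
     "chy".toList, "hy".toList, "y".toList,
     "ch".toList, "h".toList, "k".toList, "d".toList, "l".toList, "m".toList,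
     "n".toList, "r".toList, "s".toList, "t".toList]
  let prefixesSorted := PySem.List.sorted prefixes (fun p => p.length) true
  let suffixesSorted := PySem.List.sorted suffixes (fun s => s.length) true
  let tl := PySem.Chars.lower token.toList
  let pr := aPref tl prefixesSorted
  let sf := aSuf pr.2 suffixesSorted
  (String.ofList pr.1, String.ofList sf.2, String.ofList sf.1)

-- ===== PORT B =====
def pvPrefixSet : List (List Char) :=
  PySem.Set.ofList
    ["qok".toList, "sh".toList, "ch".toList, "ck".toList, "kch".toList, "dch".toList,
     "ych".toList, "ol".toList, "d".toList, "k".toList, "s".toList, "l".toList,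
     "r".toList, "y".toList, "t".toList, "p".toList, "f".toList]

def pvSuffixSet : List (List Char) :=
  PySem.Set.ofList
    ["otchy".toList, "otchor".toList, "otol".toList, "oty".toList, "ot".toList,
     "aiin".toList, "ain".toList, "iin".toList, "eey".toList, "ey".toList, "dy".toList,
     "edy".toList, "ody".toList,
     "al".toList, "ol".toList, "ar".toList, "or".toList, "am".toList,
     "che".toList, "he".toList, "ee".toList, "e".toList,
     "chy".toList, "hy".toList, "y".toList,
     "ch".toList, "h".toList, "k".toList, "d".toList, "l".toList, "m".toList,
     "n".toList, "r".toList, "s".toList, "t".toList]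

-- 'for L in range(min(3, len(t)-1), 0, -1): if t[:L] in PREFIX_SET: … break'
-- (the countdown range is ported as structural recursion on the start value;
--  Python's empty range for start ≤ 0 is the Nat-truncated start 0 here)
def bPref (tl : List Char) : Nat → List Char × List Char
  | 0 => ([], tl)
  | L + 1 =>
    let cand := PySem.List.slice tl none (some ((L : Int) + 1))
    if cand ∈ pvPrefixSet then (cand, PySem.List.slice tl (some ((L : Int) + 1)) none)
    else bPref tl L

-- 'for L in range(min(6, len(core)-1), 0, -1): if core[-L:] in SUFFIX_SET: … break'
def bSuf (c : List Char) : Nat → List Char × List Char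
  | 0 => ([], c)
  | L + 1 =>
    let cand := PySem.List.slice c (some (-((L : Int) + 1))) none
    if cand ∈ pvSuffixSet then (cand, PySem.List.slice c none (some (-((L : Int) + 1))))
    else bSuf c L

def extract_morphemes_alt (token : String) : String × String × String :=
  let tl := PySem.Chars.lower token.toList
  let pr := bPref tl (min 3 (tl.length - 1))
  let sf := bSuf pr.2 (min 6 (pr.2.length - 1))
  (String.ofList pr.1, String.ofList sf.2, String.ofList sf.1)

-- ===== PRECONDITION & SPEC =====
def Spec_extract_morphemes (token : String) (out : String × String × String) : Prop := out = extract_morphemes_alt token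
instance (token : String) (out : String × String × String) : Decidable (Spec_extract_morphemes token out) := by unfold Spec_extract_morphemes; infer_instance

-- ===== CLAIM (what is proved, stated in full; the proofs are below) =====
def Claim_equal_extract_morphemes : Prop := ∀ (token : String), Dom_extract_morphemes token → Spec_extract_morphemes token (extract_morphemes token)

-- ===== LEMMAS AND PROOFS =====

lemma aPref_skip (tl : List Char) (g rest : List (List Char))
    (h : ∀ p ∈ g, ¬(PySem.Chars.startswith tl p = true ∧ p.length < tl.length)) :
    aPref tl (g ++ rest) = aPref tl rest := by
  induction g with
  | nil => rfl
  | cons p g ih =>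
    simp only [List.cons_append, aPref, if_neg (h p (by simp))]
    exact ih (fun q hq => h q (by simp [hq]))

lemma aPref_hit (tl : List Char) (g rest : List (List Char)) (c : List Char) (m : Nat)
    (hc : c ∈ g) (hlen : ∀ p ∈ g, p.length = m) (hm : m < tl.length)
    (htake : tl.take m = c) :
    aPref tl (g ++ rest) = (c, tl.drop m) := by
  induction g with
  | nil => simp at hc
  | cons p g ih =>
    by_cases hp : PySem.Chars.startswith tl p = true ∧ p.length < tl.length
    · have hpm : p.length = m := hlen p (by simp)
      have hpc : p = c := by
        have h' := (PySem.Chars.startswith_iff tl p).mp hp.1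
        rw [List.prefix_iff_eq_take] at h'
        rw [h', hpm, htake]
      subst hpc
      simp only [List.cons_append, aPref, PySem.List.slice_from_natCast, hpm]
      rw [if_pos ⟨hp.1, hpm ▸ hp.2⟩]
    · have hpc : p ≠ c := by
        rintro rfl
        exact hp ⟨(PySem.Chars.startswith_iff tl p).mpr (htake ▸ List.take_prefix m tl),
          by rw [hlen p (by simp)]; exact hm⟩
      simp only [List.cons_append, aPref, if_neg hp]
      exact ih ((List.mem_cons.mp hc).resolve_left fun h => absurd h.symm hpc)
        (fun q hq => hlen q (by simp [hq]))

lemma aSuf_skip (c : List Char) (g rest : List (List Char))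
    (h : ∀ s ∈ g, ¬(PySem.Chars.endswith c s = true ∧ s.length < c.length)) :
    aSuf c (g ++ rest) = aSuf c rest := by
  induction g with
  | nil => rfl
  | cons s g ih =>
    simp only [List.cons_append, aSuf, if_neg (h s (by simp))]
    exact ih (fun q hq => h q (by simp [hq]))

lemma aSuf_hit (c : List Char) (g rest : List (List Char)) (t : List Char) (m : Nat)
    (hc : t ∈ g) (hlen : ∀ s ∈ g, s.length = m) (hm : m < c.length) (hm1 : 0 < m)
    (hdrop : c.drop (c.length - m) = t) :
    aSuf c (g ++ rest) = (t, c.take (c.length - m)) := by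
  induction g with
  | nil => simp at hc
  | cons s g ih =>
    by_cases hs : PySem.Chars.endswith c s = true ∧ s.length < c.length
    · have hsm : s.length = m := hlen s (by simp)
      have hst : s = t := by
        have h' := (PySem.Chars.endswith_iff c s).mp hs.1
        rw [List.suffix_iff_eq_drop] at h'
        rw [h', hsm, hdrop]
      subst hst
      simp only [List.cons_append, aSuf, hsm, PySem.List.slice_to_neg_natCast c m hm1]
      rw [if_pos ⟨hs.1, hsm ▸ hs.2⟩]
    · have hsc : s ≠ t := by
        rintro rfl
        refine hs ⟨(PySem.Chars.endswith_iff c s).mpr ?_, by rw [hlen s (by simp)]; exact hm⟩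
        rw [List.suffix_iff_eq_drop, hlen s (by simp)]
        exact hdrop.symm
      simp only [List.cons_append, aSuf, if_neg hs]
      exact ih ((List.mem_cons.mp hc).resolve_left fun h => absurd h.symm hsc)
        (fun q hq => hlen q (by simp [hq]))

-- A's scan of the length-sorted prefix list equals B's countdown over candidate lengths.
lemma pref_stage (tl : List Char) :
    ∀ (gs : List (List (List Char))),
    (∀ i, ∀ p ∈ gs.getD i [], p.length = gs.length - i) →
    (∀ p ∈ pvPrefixSet, p.length ≤ gs.length → p ∈ gs.getD (gs.length - p.length) []) →
    (∀ i, ∀ p ∈ gs.getD i [], p ∈ pvPrefixSet) →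
    aPref tl gs.flatten = bPref tl (min gs.length (tl.length - 1)) := by
  intro gs
  induction gs with
  | nil => intro _ _ _; simp [aPref, bPref]
  | cons g gs ih =>
    intro h1 h2 h3
    set n := tl.length with hn
    have hg : ∀ p ∈ g, p.length = gs.length + 1 := by
      intro p hp
      simpa using h1 0 p hp
    have h1' : ∀ i, ∀ p ∈ gs.getD i [], p.length = gs.length - i := by
      intro i p hp
      have := h1 (i + 1) p (by simpa using hp)
      simpa [Nat.succ_sub_succ] using this
    have h3' : ∀ i, ∀ p ∈ gs.getD i [], p ∈ pvPrefixSet := by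
      intro i p hp; exact h3 (i + 1) p (by simpa using hp)
    have h2' : ∀ p ∈ pvPrefixSet, p.length ≤ gs.length → p ∈ gs.getD (gs.length - p.length) [] := by
      intro p hp hl
      have := h2 p hp (by simp; omega)
      have e : gs.length + 1 - p.length = (gs.length - p.length) + 1 := by omega
      simpa [e] using this
    by_cases hcase : gs.length + 1 < n
    · -- the whole top group is a candidate length; B tests it first
      have hmin : min (g :: gs).length (n - 1) = (gs.length + 1) := by
        simp only [List.length_cons]; omega
      rw [hmin]
      have hclen : (tl.take (gs.length + 1)).length = gs.length + 1 := by
        rw [List.length_take]; omega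
      have hcast : ((gs.length : Int) + 1) = ((gs.length + 1 : Nat) : Int) := by push_cast; ring
      by_cases hmem : tl.take (gs.length + 1) ∈ pvPrefixSet
      · have hing : tl.take (gs.length + 1) ∈ g := by
          have := h2 _ hmem (by rw [hclen]; simp)
          simpa [hclen] using this
        rw [show (g :: gs).flatten = g ++ gs.flatten by simp]
        rw [aPref_hit tl g gs.flatten (tl.take (gs.length + 1)) (gs.length + 1) hing hg
          (by omega) rfl]
        simp only [bPref, hcast, PySem.List.slice_to_natCast, PySem.List.slice_from_natCast]
        rw [if_pos (by simpa using hmem)]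
      · have hskip : ∀ p ∈ g, ¬(PySem.Chars.startswith tl p = true ∧ p.length < n) := by
          intro p hp hcon
          have hpt : p = tl.take (gs.length + 1) := by
            have := (PySem.Chars.startswith_iff tl p).mp hcon.1
            rw [List.prefix_iff_eq_take] at this
            rw [this, hg p hp]
          exact hmem (hpt ▸ h3 0 p (by simpa using hp))
        rw [show (g :: gs).flatten = g ++ gs.flatten by simp]
        rw [aPref_skip tl g gs.flatten hskip]
        simp only [bPref, hcast, PySem.List.slice_to_natCast]
        rw [if_neg (by simpa using hmem)]
        have := ih h1' h2' h3'
        rwa [Nat.min_eq_left (by omega)] at this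
    · -- top group too long for this token: A's guard rejects it, B never tries that length
      have hskip : ∀ p ∈ g, ¬(PySem.Chars.startswith tl p = true ∧ p.length < n) := by
        intro p hp hcon
        rw [hg p hp] at hcon
        omega
      rw [show (g :: gs).flatten = g ++ gs.flatten by simp]
      rw [aPref_skip tl g gs.flatten hskip]
      have hmin : min (g :: gs).length (n - 1) = min gs.length (n - 1) := by
        simp only [List.length_cons]; omega
      rw [hmin]
      exact ih h1' h2' h3'

-- A's scan of the length-sorted suffix list equals B's countdown over tail lengths.
lemma suf_stage (c : List Char) :
    ∀ (gs : List (List (List Char))),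
    (∀ i, ∀ s ∈ gs.getD i [], s.length = gs.length - i) →
    (∀ s ∈ pvSuffixSet, s.length ≤ gs.length → s ∈ gs.getD (gs.length - s.length) []) →
    (∀ i, ∀ s ∈ gs.getD i [], s ∈ pvSuffixSet) →
    aSuf c gs.flatten = bSuf c (min gs.length (c.length - 1)) := by
  intro gs
  induction gs with
  | nil => intro _ _ _; simp [aSuf, bSuf]
  | cons g gs ih =>
    intro h1 h2 h3
    set n := c.length with hn
    have hg : ∀ s ∈ g, s.length = gs.length + 1 := by
      intro s hs; simpa using h1 0 s hs
    have h1' : ∀ i, ∀ s ∈ gs.getD i [], s.length = gs.length - i := by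
      intro i s hs
      have := h1 (i + 1) s (by simpa using hs)
      simpa [Nat.succ_sub_succ] using this
    have h3' : ∀ i, ∀ s ∈ gs.getD i [], s ∈ pvSuffixSet := by
      intro i s hs; exact h3 (i + 1) s (by simpa using hs)
    have h2' : ∀ s ∈ pvSuffixSet, s.length ≤ gs.length → s ∈ gs.getD (gs.length - s.length) [] := by
      intro s hs hl
      have := h2 s hs (by simp; omega)
      have e : gs.length + 1 - s.length = (gs.length - s.length) + 1 := by omega
      simpa [e] using this
    by_cases hcase : gs.length + 1 < n
    · have hmin : min (g :: gs).length (n - 1) = (gs.length + 1) := by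
        simp only [List.length_cons]; omega
      rw [hmin]
      have hclen : (c.drop (n - (gs.length + 1))).length = gs.length + 1 := by
        rw [List.length_drop]; omega
      have hcast : ((gs.length : Int) + 1) = ((gs.length + 1 : Nat) : Int) := by push_cast; ring
      by_cases hmem : c.drop (n - (gs.length + 1)) ∈ pvSuffixSet
      · have hing : c.drop (n - (gs.length + 1)) ∈ g := by
          have := h2 _ hmem (by rw [hclen]; simp)
          simpa [hclen] using this
        rw [show (g :: gs).flatten = g ++ gs.flatten by simp]
        rw [aSuf_hit c g gs.flatten (c.drop (n - (gs.length + 1))) (gs.length + 1) hing hg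
          (by omega) (by omega) rfl]
        simp only [bSuf, hcast,
          PySem.List.slice_from_neg_natCast c (gs.length + 1) (by omega),
          PySem.List.slice_to_neg_natCast c (gs.length + 1) (by omega)]
        rw [if_pos (by simpa using hmem)]
      · have hskip : ∀ s ∈ g, ¬(PySem.Chars.endswith c s = true ∧ s.length < n) := by
          intro s hs hcon
          have hst : s = c.drop (n - (gs.length + 1)) := by
            have := (PySem.Chars.endswith_iff c s).mp hcon.1
            rw [List.suffix_iff_eq_drop] at this
            rw [this, hg s hs]
          exact hmem (hst ▸ h3 0 s (by simpa using hs))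
        rw [show (g :: gs).flatten = g ++ gs.flatten by simp]
        rw [aSuf_skip c g gs.flatten hskip]
        simp only [bSuf, hcast,
          PySem.List.slice_from_neg_natCast c (gs.length + 1) (by omega)]
        rw [if_neg (by simpa using hmem)]
        have := ih h1' h2' h3'
        rwa [Nat.min_eq_left (by omega)] at this
    · have hskip : ∀ s ∈ g, ¬(PySem.Chars.endswith c s = true ∧ s.length < n) := by
        intro s hs hcon
        rw [hg s hs] at hcon
        omega
      rw [show (g :: gs).flatten = g ++ gs.flatten by simp]
      rw [aSuf_skip c g gs.flatten hskip]
      have hmin : min (g :: gs).length (n - 1) = min gs.length (n - 1) := by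
        simp only [List.length_cons]; omega
      rw [hmin]
      exact ih h1' h2' h3'

def pvPrefGroups : List (List (List Char)) :=
  [["qok".toList, "kch".toList, "dch".toList, "ych".toList],
   ["sh".toList, "ch".toList, "ck".toList, "ol".toList],
   ["d".toList, "k".toList, "s".toList, "l".toList, "r".toList, "y".toList,
    "t".toList, "p".toList, "f".toList]]

def pvSufGroups : List (List (List Char)) :=
  [["otchor".toList],
   ["otchy".toList],
   ["otol".toList, "aiin".toList],
   ["oty".toList, "ain".toList, "iin".toList, "eey".toList, "edy".toList, "ody".toList,
    "che".toList, "chy".toList],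
   ["ot".toList, "ey".toList, "dy".toList, "al".toList, "ol".toList, "ar".toList,
    "or".toList, "am".toList, "he".toList, "ee".toList, "hy".toList, "ch".toList],
   ["e".toList, "y".toList, "h".toList, "k".toList, "d".toList, "l".toList, "m".toList,
    "n".toList, "r".toList, "s".toList, "t".toList]]

-- ===== VERDICT (by name: the statement is the Claim_ definition above) =====
set_option maxRecDepth 16384 in
theorem extract_morphemes_spec : Claim_equal_extract_morphemes := by
  intro token _
  unfold Spec_extract_morphemes extract_morphemes extract_morphemes_alt
  have hpsort : PySem.List.sorted
      ["qok".toList, "sh".toList, "ch".toList, "ck".toList, "kch".toList, "dch".toList,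
       "ych".toList, "ol".toList, "d".toList, "k".toList, "s".toList, "l".toList,
       "r".toList, "y".toList, "t".toList, "p".toList, "f".toList]
      (fun p => p.length) true = pvPrefGroups.flatten := by decide
  have hssort : PySem.List.sorted
      ["otchy".toList, "otchor".toList, "otol".toList, "oty".toList, "ot".toList,
       "aiin".toList, "ain".toList, "iin".toList, "eey".toList, "ey".toList, "dy".toList,
       "edy".toList, "ody".toList,
       "al".toList, "ol".toList, "ar".toList, "or".toList, "am".toList,
       "che".toList, "he".toList, "ee".toList, "e".toList,
       "chy".toList, "hy".toList, "y".toList,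
       "ch".toList, "h".toList, "k".toList, "d".toList, "l".toList, "m".toList,
       "n".toList, "r".toList, "s".toList, "t".toList]
      (fun s => s.length) true = pvSufGroups.flatten := by decide
  simp only [hpsort, hssort]
  have hp := pref_stage (PySem.Chars.lower token.toList) pvPrefGroups
    (by intro i p hp; match i with
        | 0 => revert hp; revert p; decide
        | 1 => revert hp; revert p; decide
        | 2 => revert hp; revert p; decide
        | (j+3) => simp [pvPrefGroups] at hp)
    (by decide)
    (by intro i p hp; match i with
        | 0 => revert hp; revert p; decide
        | 1 => revert hp; revert p; decide
        | 2 => revert hp; revert p; decide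
        | (j+3) => simp [pvPrefGroups] at hp)
  have hs := suf_stage (bPref (PySem.Chars.lower token.toList)
      (min 3 ((PySem.Chars.lower token.toList).length - 1))).2 pvSufGroups
    (by intro i s hs; match i with
        | 0 => revert hs; revert s; decide
        | 1 => revert hs; revert s; decide
        | 2 => revert hs; revert s; decide
        | 3 => revert hs; revert s; decide
        | 4 => revert hs; revert s; decide
        | 5 => revert hs; revert s; decide
        | (j+6) => simp [pvSufGroups] at hs)
    (by decide)
    (by intro i s hs; match i with
        | 0 => revert hs; revert s; decide
        | 1 => revert hs; revert s; decide
        | 2 => revert hs; revert s; decide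
        | 3 => revert hs; revert s; decide
        | 4 => revert hs; revert s; decide
        | 5 => revert hs; revert s; decide
        | (j+6) => simp [pvSufGroups] at hs)
  rw [show pvPrefGroups.length = 3 from rfl] at hp
  rw [show pvSufGroups.length = 6 from rfl] at hs
  rw [hp, hs]
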